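-- pv_equiv track=rewrite | github.com/lynnwebber/aatest | python/xlsxfile/v3xml/rtufile.py | get_equipment_and_tags
-- ===== SOURCE A (Python) =====
-- def get_equipment_and_tags(tagrecs):
--     equip_tag_dict = {}
--     # scan the tag records and find the uniique equipment and place
--     #     them in the dictionary with a blank list
--     for rec in tagrecs:
--         equip_name = rec['Wellkeeper_Equipment']
--         if equip_name not in equip_tag_dict:
--             equip_tag_dict[equip_name] = []
--
--     # scan the tags and place them in a list of records associated
--     #    with the specific equipment
--     for rec in tagrecs:
--         equip_name = rec['Wellkeeper_Equipment']
--         equip_tag_dict[equip_name].append(rec['Tag_Name'])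
--
--     return equip_tag_dict
-- ===== SOURCE B (Python) =====
-- def get_equipment_and_tags(tagrecs):
--     # flatten once to (equipment, tag) pairs, then for each key gather its
--     # tags with a whole-list filter (values computed wholesale, not appended)
--     pairs = [(rec['Wellkeeper_Equipment'], rec['Tag_Name']) for rec in tagrecs]
--     return {k: [t for k2, t in pairs if k2 == k] for k, _ in pairs}
-- ===== Notes on version B (the rewrite author's own statement) =====
-- stated objective: alternative
-- what changed: Instead of A's incremental dict-of-lists build (seed pass then append pass), B flattens to (equipment, tag) pairs once and builds the dict by a comprehension whose value for each key is computed wholesale by filtering the whole pair list, trading O(n) appends for per-key filter scans.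
import Mathlib
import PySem

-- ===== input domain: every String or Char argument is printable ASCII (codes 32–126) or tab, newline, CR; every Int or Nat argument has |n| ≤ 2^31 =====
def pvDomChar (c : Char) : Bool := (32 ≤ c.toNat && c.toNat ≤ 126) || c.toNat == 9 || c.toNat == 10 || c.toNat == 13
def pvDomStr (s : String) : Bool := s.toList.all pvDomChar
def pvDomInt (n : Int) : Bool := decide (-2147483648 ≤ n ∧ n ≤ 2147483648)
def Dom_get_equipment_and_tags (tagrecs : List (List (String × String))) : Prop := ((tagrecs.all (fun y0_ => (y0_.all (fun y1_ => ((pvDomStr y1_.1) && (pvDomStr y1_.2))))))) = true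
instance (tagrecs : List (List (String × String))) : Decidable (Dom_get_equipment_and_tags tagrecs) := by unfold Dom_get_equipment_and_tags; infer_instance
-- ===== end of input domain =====

-- B replaces A's two-pass incremental dict build by one flatten-to-pairs pass plus
-- a per-key whole-list filter in a dict comprehension (alternative algorithm).

-- ===== PORT A =====
-- rec['k'] : Python dict lookup (a missing key raises KeyError; Pre_ excludes that, the "" default is never reached inside Pre_)
def pvRecGet (r : List (String × String)) (k : String) : String :=
  ((PySem.Dict.mk r).get? k).getD ""

def pvKey (r : List (String × String)) : String := pvRecGet r "Wellkeeper_Equipment"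
def pvTag (r : List (String × String)) : String := pvRecGet r "Tag_Name"

-- A: first loop seeds each equipment with [], second loop appends the tags
def get_equipment_and_tags (tagrecs : List (List (String × String))) : List (String × List String) :=
  (tagrecs.foldl
    (fun d r => d.modify (pvKey r) [] (fun v => v ++ [pvTag r]))
    (tagrecs.foldl
      (fun d r => if d.contains (pvKey r) then d else d.insert (pvKey r) ([] : List String))
      PySem.Dict.empty)).items

-- ===== PORT B =====
-- B: pairs = [(key, tag) for rec in tagrecs]; {k: [t for (k2,t) in pairs if k2 == k] for (k,_) in pairs}
def get_equipment_and_tags_alt (tagrecs : List (List (String × String))) : List (String × List String) :=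
  let pairs := tagrecs.map (fun r => (pvKey r, pvTag r))
  (pairs.foldl
    (fun d p => d.insert p.1 ((pairs.filter (fun q => q.1 == p.1)).map (fun q => q.2)))
    PySem.Dict.empty).items

-- ===== PRECONDITION & SPEC =====
-- Pre_ excludes exactly the inputs where A raises KeyError: a record missing either key.
def Pre_get_equipment_and_tags (tagrecs : List (List (String × String))) : Prop :=
  ∀ r ∈ tagrecs, (PySem.Dict.mk r).contains "Wellkeeper_Equipment" = true ∧ (PySem.Dict.mk r).contains "Tag_Name" = true

instance (tagrecs : List (List (String × String))) : Decidable (Pre_get_equipment_and_tags tagrecs) := by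
  unfold Pre_get_equipment_and_tags; infer_instance

def pvWitness_get_equipment_and_tags : (List (List (String × String))) :=
  [[("Wellkeeper_Equipment", "E1"), ("Tag_Name", "T1")], [("Wellkeeper_Equipment", "E1"), ("Tag_Name", "T2")]]

def Spec_get_equipment_and_tags (tagrecs : List (List (String × String))) (out : List (String × List String)) : Prop := out = get_equipment_and_tags_alt tagrecs
instance (tagrecs : List (List (String × String))) (out : List (String × List String)) : Decidable (Spec_get_equipment_and_tags tagrecs out) := by unfold Spec_get_equipment_and_tags; infer_instance

-- ===== CLAIM =====
def Claim_equal_get_equipment_and_tags : Prop := ∀ (tagrecs : List (List (String × String))), Dom_get_equipment_and_tags tagrecs → Pre_get_equipment_and_tags tagrecs → Spec_get_equipment_and_tags tagrecs (get_equipment_and_tags tagrecs)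

-- ===== LEMMAS AND PROOFS =====

-- keys of A's seeding loop
theorem pv_seed_keys (l : List (List (String × String))) :
    ∀ d : PySem.Dict String (List String),
      (l.foldl (fun d r => if d.contains (pvKey r) then d else d.insert (pvKey r) ([] : List String)) d).keys
        = PySem.Set.update d.keys (l.map pvKey) := by
  induction l with
  | nil => intro d; simp [PySem.Set.update]
  | cons r l ih =>
    intro d
    simp only [List.foldl_cons, List.map_cons, PySem.Set.update_cons]
    cases h : d.contains (pvKey r)
    · simp only [Bool.false_eq_true, if_false, ih]
      rw [PySem.Set.add_of_not_mem (fun hm => by simp [(PySem.Dict.contains_iff_mem_keys d (pvKey r)).mpr hm] at h),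
        ← PySem.Dict.keys_insert_of_not_contains d ([] : List String) h]
    · simp only [if_true, ih]
      rw [PySem.Set.add_of_mem ((PySem.Dict.contains_iff_mem_keys d (pvKey r)).mp h)]

-- every value stored by the seeding loop is []
theorem pv_seed_getD (l : List (List (String × String))) :
    ∀ d : PySem.Dict String (List String), (∀ c, d.getD c [] = []) → ∀ c,
      (l.foldl (fun d r => if d.contains (pvKey r) then d else d.insert (pvKey r) ([] : List String)) d).getD c []
        = [] := by
  induction l with
  | nil => intro d hd c; exact hd c
  | cons r l ih =>
    intro d hd c
    simp only [List.foldl_cons]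
    refine ih _ (fun c' => ?_) c
    cases h : d.contains (pvKey r)
    · simp only [Bool.false_eq_true, if_false, PySem.Dict.getD_insert]
      split_ifs with hc
      · rfl
      · exact hd c'
    · simpa only [h, if_true] using hd c'

-- A's append loop, re-expressed on pairs
theorem pv_modify_fold (l : List (List (String × String))) (d : PySem.Dict String (List String)) (c : String) :
    (l.foldl (fun d r => d.modify (pvKey r) [] (fun v => v ++ [pvTag r])) d).getD c []
      = d.getD c [] ++ ((l.map (fun r => (pvKey r, pvTag r))).filter (fun p => p.1 == c)).map (fun p => p.2) := by
  rw [← PySem.Dict.getD_foldl_modify_append (l.map (fun r => (pvKey r, pvTag r))) d c, List.foldl_map]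

-- B's loop inserts a value depending only on the key: final getD is that value on hit keys
theorem pv_insert_fold (f : String → List String) (c : String) (l : List (String × String)) :
    ∀ d : PySem.Dict String (List String),
      (l.foldl (fun d p => d.insert p.1 (f p.1)) d).getD c []
        = if c ∈ l.map Prod.fst then f c else d.getD c [] := by
  induction l with
  | nil => intro d; simp
  | cons p l ih =>
    intro d
    simp only [List.foldl_cons, ih, List.map_cons, List.mem_cons, PySem.Dict.getD_insert]
    by_cases h1 : c ∈ l.map Prod.fst <;> by_cases h2 : c = p.1 <;> simp [h1, h2]

-- ===== VERDICT =====
theorem get_equipment_and_tags_spec : Claim_equal_get_equipment_and_tags := by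
  intro tagrecs _hdom _hpre
  unfold Spec_get_equipment_and_tags get_equipment_and_tags get_equipment_and_tags_alt
  set pairs := tagrecs.map (fun r => (pvKey r, pvTag r)) with hpairs
  set seedD := tagrecs.foldl
      (fun d r => if d.contains (pvKey r) then d else d.insert (pvKey r) ([] : List String))
      PySem.Dict.empty with hseed
  set dA := tagrecs.foldl (fun d r => d.modify (pvKey r) [] (fun v => v ++ [pvTag r])) seedD with hdA
  set fB := fun c => (pairs.filter (fun q => q.1 == c)).map (fun q => q.2) with hfB
  set dB := pairs.foldl (fun d p => d.insert p.1 (fB p.1)) PySem.Dict.empty with hdB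
  have hmapfst : pairs.map Prod.fst = tagrecs.map pvKey := by
    rw [hpairs, List.map_map]; rfl
  have hKA : dA.keys = PySem.Set.update (PySem.Set.update [] (tagrecs.map pvKey)) (tagrecs.map pvKey) := by
    rw [hdA, PySem.Dict.keys_foldl_modify_key tagrecs pvKey [] (fun _ r => fun v => v ++ [pvTag r]),
      hseed, pv_seed_keys, PySem.Dict.keys_empty]
  have hKB : dB.keys = PySem.Set.update [] (tagrecs.map pvKey) := by
    rw [hdB, PySem.Dict.keys_foldl_insert_key pairs Prod.fst (fun _ p => fB p.1) PySem.Dict.empty,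
      PySem.Dict.keys_empty, hmapfst]
  have hKK : PySem.Set.update (PySem.Set.update ([] : List String) (tagrecs.map pvKey)) (tagrecs.map pvKey)
      = PySem.Set.update [] (tagrecs.map pvKey) := by
    rw [PySem.Set.update_eq_append_filter (PySem.Set.update [] (tagrecs.map pvKey)) (tagrecs.map pvKey)]
    have : List.filter (fun y => !(PySem.Set.update ([] : List String) (tagrecs.map pvKey)).contains y)
        (PySem.Set.ofList (tagrecs.map pvKey)) = [] := by
      rw [List.filter_eq_nil_iff]
      intro y hy
      have : y ∈ PySem.Set.update ([] : List String) (tagrecs.map pvKey) := by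
        rw [PySem.Set.update_nil_left]; exact hy
      rw [Bool.not_eq_true', (PySem.Set.contains_iff _ y).mpr this]
      simp
    rw [this, List.append_nil]
  have hNA : dA.keys.Nodup := by
    rw [hKA]; exact PySem.Set.nodup_update _ _ (PySem.Set.nodup_update _ _ List.nodup_nil)
  have hNB : dB.keys.Nodup := by
    rw [hKB]; exact PySem.Set.nodup_update _ _ List.nodup_nil
  have hG : ∀ k, k ∈ PySem.Set.update ([] : List String) (tagrecs.map pvKey) → dA.getD k [] = dB.getD k [] := by
    intro k hk
    have hkmem : k ∈ pairs.map Prod.fst := by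
      rw [hmapfst]
      rw [PySem.Set.update_nil_left] at hk
      exact (PySem.Set.mem_ofList _ _).mp hk
    rw [hdA, pv_modify_fold, hseed,
      pv_seed_getD tagrecs PySem.Dict.empty (fun c' => PySem.Dict.getD_empty c' []) k,
      hdB, pv_insert_fold fB k pairs PySem.Dict.empty, if_pos hkmem, hfB]
    simp [hpairs]
  rw [PySem.Dict.items_eq_map_keys dA hNA [], PySem.Dict.items_eq_map_keys dB hNB [],
    hKA, hKB, hKK]
  exact List.map_congr_left (fun k hk => by rw [hG k hk])
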